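-- pv_equiv track=rewrite | github.com/zhangsj0608/Dybatch | tree/TreeOps.py | construct_merged_tree
-- ===== SOURCE A (Python) =====
-- def construct_merged_tree(leaves_encodings_of_pptrees_list):
--     """
--     construct the public & maximum tree out of the pptree list
--     :param leaves_encodings_of_pptrees_list: tree leaves encodings list
--     :return: the merged tree leaves encodings， 最大树
--     """
--     if len(leaves_encodings_of_pptrees_list) > 0:
--         merged_tree_leaves_encodings = leaves_encodings_of_pptrees_list[0][:]  # 最大树
--
--     for tree_leaves_encodings in leaves_encodings_of_pptrees_list[1:]:
--         index_merged_tree = 0  # 最大树的标记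
--         for leave_encoding_index in range(len(tree_leaves_encodings)):
--             leave_encoding = tree_leaves_encodings[leave_encoding_index]  # 当前的树的节点
--
--             while index_merged_tree < len(merged_tree_leaves_encodings) and\
--                     compare_encodings(leave_encoding, merged_tree_leaves_encodings[index_merged_tree]) == -2:
--                 # leave_encoding 大
--                 index_merged_tree += 1
--
--             if index_merged_tree == len(merged_tree_leaves_encodings):  # 最大树已经到了，则将当最大树的节点前树的剩余部分复制到最大树
--                 merged_tree_leaves_encodings.extend(tree_leaves_encodings[leave_encoding_index:])
--                 break
--
--             merged_encoding = merged_tree_leaves_encodings[index_merged_tree]  #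
--
--             if compare_encodings(leave_encoding, merged_encoding) == -1:  # leave_encoding 小
--                 merged_tree_leaves_encodings = merged_tree_leaves_encodings[0: index_merged_tree] + [leave_encoding] + \
--                     merged_tree_leaves_encodings[index_merged_tree:]  # 插入当前的最大树的位置
--             else:  # 相等
--                 common_encoding = compare_encodings(leave_encoding, merged_encoding)
--                 # 将相等的节点换为长度较长的节点
--                 merged_tree_leaves_encodings[index_merged_tree] = common_encoding
--
--             index_merged_tree += 1  # 最大树的标记右移
--
--     return merged_tree_leaves_encodings
--
-- def compare_encodings(str0, str1):
--     """
--     compare two encoding strings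
--     :param str0: encoding string made of 0 and 1
--     :param str1: encoding string made of 0 and 1
--     :return: str0 < str1, 则返回-1；str0 > str1, 则返回-2；如果两个长度不同，且内容相同，则返回长str
--     """
--     if len(str0) < len(str1):
--         str0 += '0' * (len(str1) - len(str0))
--     elif len(str0) > len(str1):
--         str1 += '0' * (len(str0) - len(str1))
--
--     if str0 == str1:
--         return str0  # 扩展后两个相同，返回长的str
--     for i in range(len(str0)):
--         if str0[i] < str1[i]:  # str0 小
--             return -1
--         elif str0[i] > str1[i]:  # str0 大
--             return -2
-- ===== SOURCE B (Python) =====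
-- def compare_encodings(str0, str1):
--     """
--     compare two encoding strings (same contract as the original helper):
--     -1 if str0 < str1, -2 if str0 > str1 after zero-padding to equal length,
--     else the (longer, zero-padded) common string.
--     """
--     if len(str0) < len(str1):
--         str0 += '0' * (len(str1) - len(str0))
--     elif len(str0) > len(str1):
--         str1 += '0' * (len(str0) - len(str1))
--
--     if str0 == str1:
--         return str0
--     for i in range(len(str0)):
--         if str0[i] < str1[i]:
--             return -1
--         elif str0[i] > str1[i]:
--             return -2
--
--
-- def _merge_two(merged, tree):
--     """Two-pointer merge of one tree into the current maximum tree,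
--     appending into a fresh output list (no slice-copy inserts)."""
--     out = []
--     j = 0
--     n = len(merged)
--     for k in range(len(tree)):
--         e = tree[k]
--         while j < n and compare_encodings(e, merged[j]) == -2:
--             out.append(merged[j])
--             j += 1
--         if j == n:
--             out.extend(tree[k:])
--             return out
--         c = compare_encodings(e, merged[j])
--         if c == -1:
--             out.append(e)
--         else:
--             out.append(c)
--             j += 1
--     out.extend(merged[j:])
--     return out
--
--
-- def construct_merged_tree(leaves_encodings_of_pptrees_list):
--     merged = list(leaves_encodings_of_pptrees_list[0])
--     for tree in leaves_encodings_of_pptrees_list[1:]: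
--         merged = _merge_two(merged, tree)
--     return merged
-- ===== Notes on version B (the rewrite author's own statement) =====
-- stated objective: faster
-- what changed: Each tree is merged into the maximum tree by a two-pointer merge that appends into a fresh output list, replacing A's slice-copy insertions (m = m[:i] + [e] + m[i:]) and index-rescanning into the evolving list.
-- outside the precondition, e.g. on construct_merged_tree([]): A raises UnboundLocalError, B raises IndexError
import Mathlib
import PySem

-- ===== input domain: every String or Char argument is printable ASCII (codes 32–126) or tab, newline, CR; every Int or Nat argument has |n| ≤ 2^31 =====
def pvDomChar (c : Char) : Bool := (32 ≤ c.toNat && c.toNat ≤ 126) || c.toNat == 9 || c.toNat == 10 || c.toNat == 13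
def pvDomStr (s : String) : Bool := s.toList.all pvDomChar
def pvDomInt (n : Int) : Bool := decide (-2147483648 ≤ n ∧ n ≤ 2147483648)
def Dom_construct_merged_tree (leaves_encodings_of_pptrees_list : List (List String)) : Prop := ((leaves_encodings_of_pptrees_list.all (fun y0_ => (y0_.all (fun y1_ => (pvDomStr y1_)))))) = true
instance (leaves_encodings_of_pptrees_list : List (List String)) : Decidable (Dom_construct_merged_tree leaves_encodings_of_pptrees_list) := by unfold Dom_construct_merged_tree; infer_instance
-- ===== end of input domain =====

set_option maxRecDepth 4000


-- B replaces A's slice-copy insertions into the merged list by a two-pointer merge that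
-- appends into a fresh output list (objective: faster). Same helper compare_encodings.

-- ===== PORT A =====
-- result of compare_encodings: -1, -2, or the common (padded) string
inductive CmpRes
  | lt
  | gt
  | common (s : String)
deriving DecidableEq, Repr

-- the char-by-char loop of compare_encodings (both lists have equal length at the call);
-- exhaustion (Python would fall through returning None) is unreachable because the caller
-- only runs the loop on unequal equal-length strings; .gt there keeps the port total
def cmpChars : List Char → List Char → CmpRes
  | c :: cs, d :: ds => if c < d then .lt else if d < c then .gt else cmpChars cs ds
  | _, _ => .gt

-- exact port of compare_encodings: zero-pad the shorter (Nat subtraction covers both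
-- if/elif branches exactly), return the common string if equal, else the first-difference sign
def compare_encodings (str0 str1 : String) : CmpRes :=
  let a := str0.toList ++ List.replicate (str1.toList.length - str0.toList.length) '0'
  let b := str1.toList ++ List.replicate (str0.toList.length - str1.toList.length) '0'
  if a = b then .common (String.ofList a) else cmpChars a b

-- A's while loop: advance index_merged_tree while the leaf compares greater;
-- the recursion is structural on the still-unscanned suffix m.drop i, kept alongside the index
def skipAAux (e : String) (i : Nat) : List String → Nat
  | [] => i
  | x :: xs => if compare_encodings e x = .gt then skipAAux e (i + 1) xs else i

def skipA (e : String) (m : List String) (i : Nat) : Nat :=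
  skipAAux e i (m.drop i)

-- A's inner for loop over the remaining leaves, state = (index_merged_tree, merged list);
-- the .gt branch after the skip is unreachable in Python (the while guarantees ≠ -2)
def innerA : List String → Nat → List String → List String
  | [], _, m => m
  | e :: ts, i, m =>
    let i' := skipA e m i
    if i' = m.length then m ++ (e :: ts)
    else
      match compare_encodings e (m.getD i' "") with
      | .lt => innerA ts (i' + 1) (m.take i' ++ [e] ++ m.drop i')
      | .common c => innerA ts (i' + 1) (m.set i' c)
      | .gt => innerA ts (i' + 1) (m.set i' (m.getD i' ""))

def construct_merged_tree (leaves_encodings_of_pptrees_list : List (List String)) : List String :=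
  match leaves_encodings_of_pptrees_list with
  | [] => []  -- Python raises UnboundLocalError here; excluded by Pre_
  | first :: rest => rest.foldl (fun m t => innerA t 0 m) first

-- ===== PORT B =====
-- B's while loop: copy smaller merged elements straight to the output, advancing j;
-- structural on the still-unscanned suffix merged.drop j
def skipBAux (e : String) (out : List String) (j : Nat) : List String → List String × Nat
  | [] => (out, j)
  | x :: xs => if compare_encodings e x = .gt then skipBAux e (out ++ [x]) (j + 1) xs else (out, j)

def skipB (e : String) (out : List String) (j : Nat) (merged : List String) : List String × Nat :=
  skipBAux e out j (merged.drop j)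

-- B's inner for loop (merge_two): two pointers, fresh output list; the .gt branch after the
-- skip is unreachable in Python (the while guarantees ≠ -2)
def innerB : List String → List String → Nat → List String → List String
  | out, [], j, merged => out ++ merged.drop j
  | out, e :: ts, j, merged =>
    let p := skipB e out j merged
    if p.2 = merged.length then p.1 ++ (e :: ts)
    else
      match compare_encodings e (merged.getD p.2 "") with
      | .lt => innerB (p.1 ++ [e]) ts p.2 merged
      | .common c => innerB (p.1 ++ [c]) ts (p.2 + 1) merged
      | .gt => innerB (p.1 ++ [merged.getD p.2 ""]) ts (p.2 + 1) merged

def construct_merged_tree_alt (leaves_encodings_of_pptrees_list : List (List String)) : List String :=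
  match leaves_encodings_of_pptrees_list with
  | [] => []
  | first :: rest => rest.foldl (fun m t => innerB [] t 0 m) first

-- ===== PRECONDITION & SPEC =====
-- Python A raises UnboundLocalError on the empty outer list (B raises IndexError there too)
def Pre_construct_merged_tree (leaves_encodings_of_pptrees_list : List (List String)) : Prop :=
  leaves_encodings_of_pptrees_list ≠ []
instance (leaves_encodings_of_pptrees_list : List (List String)) : Decidable (Pre_construct_merged_tree leaves_encodings_of_pptrees_list) := by unfold Pre_construct_merged_tree; infer_instance
def pvWitness_construct_merged_tree : List (List String) := [["0", "1"], ["01"]]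

def Spec_construct_merged_tree (leaves_encodings_of_pptrees_list : List (List String)) (out : List String) : Prop := out = construct_merged_tree_alt leaves_encodings_of_pptrees_list
instance (leaves_encodings_of_pptrees_list : List (List String)) (out : List String) : Decidable (Spec_construct_merged_tree leaves_encodings_of_pptrees_list out) := by unfold Spec_construct_merged_tree; infer_instance

-- ===== CLAIM (what is proved, stated in full; the proofs are below) =====
def Claim_equal_construct_merged_tree : Prop := ∀ (leaves_encodings_of_pptrees_list : List (List String)), Dom_construct_merged_tree leaves_encodings_of_pptrees_list → Pre_construct_merged_tree leaves_encodings_of_pptrees_list → Spec_construct_merged_tree leaves_encodings_of_pptrees_list (construct_merged_tree leaves_encodings_of_pptrees_list)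

-- ===== LEMMAS AND PROOFS =====

-- setting the element right after a prefix replaces the head of the suffix
theorem set_append_len {a : Type} (l1 : List a) (x : a) (l2 : List a) (c : a) :
    (l1 ++ x :: l2).set l1.length c = l1 ++ c :: l2 := by
  induction l1 with
  | nil => rfl
  | cons y ys ih => simp [ih]

-- drop facts for a nonempty suffix
theorem drop_cons_facts {a : Type} (l : List a) (j : Nat) (x : a) (xs : List a)
    (h : l.drop j = x :: xs) : j < l.length ∧ l.drop (j + 1) = xs := by
  constructor
  · by_contra hge
    rw [List.drop_eq_nil_of_le (by omega)] at h
    simp at h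
  · have ht : (l.drop j).tail = l.drop (j + 1) := List.tail_drop
    rw [h] at ht
    exact ht.symm

-- skip correspondence on the scanned suffix: A's while from index out.length over
-- out ++ rest equals B's while with pointers (out, j), the underlying list unchanged
theorem skip_aux_corr (e : String) (merged : List String) :
    ∀ rest out j, merged.drop j = rest → j ≤ merged.length →
      skipAAux e out.length rest = (skipBAux e out j rest).1.length ∧
      (skipBAux e out j rest).1 ++ merged.drop (skipBAux e out j rest).2 = out ++ rest ∧
      (skipBAux e out j rest).2 ≤ merged.length := by
  intro rest
  induction rest with
  | nil =>
    intro out j hd hj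
    exact ⟨rfl, by rw [skipBAux]; rw [hd], hj⟩
  | cons x xs ih =>
    intro out j hd hj
    obtain ⟨hjlt, hxs⟩ := drop_cons_facts merged j x xs hd
    rw [skipAAux, skipBAux]
    by_cases hc : compare_encodings e x = .gt
    · rw [if_pos hc, if_pos hc]
      obtain ⟨h1, h2, h3⟩ := ih (out ++ [x]) (j + 1) hxs (by omega)
      refine ⟨?_, ?_, h3⟩
      · have : out.length + 1 = (out ++ [x]).length := by simp
        rw [this]; exact h1
      · rw [h2]; simp
    · rw [if_neg hc, if_neg hc]
      exact ⟨rfl, by rw [hd], hj⟩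

-- skip correspondence in the form inner_corr uses
theorem skip_corr (e : String) (merged : List String) :
    ∀ j out, j ≤ merged.length →
      skipA e (out ++ merged.drop j) out.length = (skipB e out j merged).1.length ∧
      (skipB e out j merged).1 ++ merged.drop (skipB e out j merged).2 = out ++ merged.drop j ∧
      (skipB e out j merged).2 ≤ merged.length := by
  intro j out hj
  have hrw : (out ++ merged.drop j).drop out.length = merged.drop j := List.drop_left
  unfold skipA skipB
  rw [hrw]
  exact skip_aux_corr e merged (merged.drop j) out j rfl hj

-- inner-loop correspondence: A's evolving merged list is always out ++ merged.drop j
theorem inner_corr (merged : List String) :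
    ∀ ts out j, j ≤ merged.length →
      innerA ts out.length (out ++ merged.drop j) = innerB out ts j merged := by
  intro ts
  induction ts with
  | nil => intro out j hj; rfl
  | cons e ts ih =>
    intro out j hj
    obtain ⟨h1, h2, h3⟩ := skip_corr e merged j out hj
    rw [innerA, innerB]
    generalize hsk : skipB e out j merged = p at h1 h2 h3 ⊢
    obtain ⟨o', j'⟩ := p
    dsimp only at h1 h2 h3 ⊢
    rw [h1, ← h2]
    by_cases hend : j' = merged.length
    · have hdrop : merged.drop j' = [] := List.drop_eq_nil_of_le (by omega)
      rw [if_pos (by rw [hdrop]; simp), if_pos hend, hdrop]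
      simp
    · have hlt : j' < merged.length := by omega
      have hdrop : merged.drop j' = merged[j'] :: merged.drop (j' + 1) :=
        List.drop_eq_getElem_cons hlt
      rw [if_neg (by rw [hdrop]; simp; omega), if_neg hend]
      have hgetA : (o' ++ merged.drop j').getD o'.length "" = merged[j'] := by
        rw [List.getD_eq_getElem _ _ (by rw [hdrop]; simp; omega)]
        rw [List.getElem_append_right (Nat.le_refl _)]
        simp only [Nat.sub_self, hdrop, List.getElem_cons_zero]
      have hgetB : merged.getD j' "" = merged[j'] := List.getD_eq_getElem _ _ hlt
      rw [hgetA, hgetB]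
      cases hc : compare_encodings e merged[j'] with
      | lt =>
        dsimp only
        rw [List.take_left, List.drop_left]
        have := ih (o' ++ [e]) j' h3
        simpa [List.append_assoc] using this
      | common c =>
        dsimp only
        rw [hdrop, set_append_len]
        have := ih (o' ++ [c]) (j' + 1) (by omega)
        simpa using this
      | gt =>
        dsimp only
        rw [hdrop, set_append_len]
        have := ih (o' ++ [merged[j']]) (j' + 1) (by omega)
        simpa using this

-- ===== VERDICT (by name: the statement is the Claim_ definition above) =====
theorem construct_merged_tree_spec : Claim_equal_construct_merged_tree := by
  intro L _ _
  unfold Spec_construct_merged_tree construct_merged_tree construct_merged_tree_alt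
  cases L with
  | nil => rfl
  | cons first rest =>
    simp only
    congr 1
    funext m t
    have h := inner_corr m t [] 0 (Nat.zero_le _)
    simpa using h
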